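-- pv_equiv track=rewrite | github.com/raeez/chiral-bar-cobar | compute/lib/bar_character_algebraic.py | riordan_numbers
-- ===== SOURCE A (Python) =====
-- from typing import Dict, List, Optional, Tuple
--
-- def riordan_numbers(N: int) -> List[int]:
--     r"""Riordan numbers R(0), R(1), ..., R(N-1). OEIS A005043.
--
--     Recurrence: (n+1) R(n) = (n-1)(2 R(n-1) + 3 R(n-2))
--
--     Values: 1, 0, 1, 1, 3, 6, 15, 36, 91, 232, 603, ...
--
--     The generating function R(x) = sum R(n) x^n satisfies:
--         x(1+x) R^2 - (1+x) R + 1 = 0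
--     """
--     if N <= 0:
--         return []
--     R = [0] * N
--     R[0] = 1
--     if N > 1:
--         R[1] = 0
--     for n in range(2, N):
--         R[n] = ((n - 1) * (2 * R[n - 1] + 3 * R[n - 2])) // (n + 1)
--     return R
-- ===== SOURCE B (Python) =====
-- from typing import Dict, List, Optional, Tuple
--
-- def riordan_numbers(N: int) -> List[int]:
--     """Riordan numbers R(0..N-1) derived from the Motzkin numbers.
--
--     First compute Motzkin numbers M(0..N-2) by their holonomic recurrence
--         (n+2) M(n) = (2n+1) M(n-1) + 3(n-1) M(n-2),
--     then use the generating-function identity (1+x) R(x) = 1 + x M(x),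
--     i.e. R(0) = 1 and R(n) = M(n-1) - R(n-1).  All arithmetic is exact.
--     """
--     if N <= 0:
--         return []
--     motzkin = [1, 1]
--     for n in range(2, N - 1):
--         motzkin.append(((2 * n + 1) * motzkin[n - 1] + (3 * n - 3) * motzkin[n - 2]) // (n + 2))
--     out = [1]
--     for n in range(1, N):
--         out.append(motzkin[n - 1] - out[-1])
--     return out
-- ===== Notes on version B (the rewrite author's own statement) =====
-- stated objective: alternative
-- what changed: B derives the Riordan numbers from the Motzkin numbers: it computes M(0..N-2) by the Motzkin holonomic recurrence and then peels off the Riordan numbers by alternating subtraction (each Riordan number is the preceding Motzkin number minus the preceding Riordan number, from the generating-function identity linking the two sequences), instead of A's direct three-term Riordan recurrence on a preallocated array.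
import Mathlib
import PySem

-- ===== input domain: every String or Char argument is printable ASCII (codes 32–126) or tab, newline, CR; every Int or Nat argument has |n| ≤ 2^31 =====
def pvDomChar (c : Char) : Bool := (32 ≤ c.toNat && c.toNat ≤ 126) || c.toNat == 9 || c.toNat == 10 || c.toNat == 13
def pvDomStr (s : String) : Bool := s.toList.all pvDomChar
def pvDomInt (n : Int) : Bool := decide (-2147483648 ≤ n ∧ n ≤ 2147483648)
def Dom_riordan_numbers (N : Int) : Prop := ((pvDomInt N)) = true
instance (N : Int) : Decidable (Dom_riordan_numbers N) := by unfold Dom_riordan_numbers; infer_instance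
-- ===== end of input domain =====

-- B derives the Riordan numbers from the Motzkin numbers (computed by their own
-- holonomic recurrence) by alternating subtraction, following the generating-function
-- identity linking the two sequences, instead of A's direct Riordan recurrence.

-- ===== PORT A =====
-- A's loop body; indices n-1, n-2 are always in range (2 ≤ n < N = length), so pyGetD's default is never used
def stepA (R : List Int) (n : Int) : List Int :=
  R.set n.toNat
    (PySem.Int.floordiv
      ((n - 1) * (2 * PySem.List.pyGetD R (n - 1) 0 + 3 * PySem.List.pyGetD R (n - 2) 0))
      (n + 1))

def riordan_numbers (N : Int) : List Int :=
  if N ≤ 0 then []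
  else
    let R := List.replicate N.toNat (0 : Int)
    let R := R.set 0 1
    let R := if N > 1 then R.set 1 0 else R
    (PySem.List.pyRange 2 N 1).foldl stepA R

-- ===== PORT B =====
-- B's Motzkin loop body: motzkin.append(((2n+1)*motzkin[n-1] + (3n-3)*motzkin[n-2]) // (n+2))
def stepM (mo : List Int) (n : Int) : List Int :=
  mo ++ [PySem.Int.floordiv
    ((2 * n + 1) * PySem.List.pyGetD mo (n - 1) 0 + (3 * n - 3) * PySem.List.pyGetD mo (n - 2) 0)
    (n + 2)]

-- B's output loop body: out.append(motzkin[n-1] - out[-1])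
def stepR (motzkin : List Int) (out : List Int) (n : Int) : List Int :=
  out ++ [PySem.List.pyGetD motzkin (n - 1) 0 - PySem.List.pyGetD out (-1) 0]

def riordan_numbers_alt (N : Int) : List Int :=
  if N ≤ 0 then []
  else
    let motzkin := (PySem.List.pyRange 2 (N - 1) 1).foldl stepM [1, 1]
    (PySem.List.pyRange 1 N 1).foldl (stepR motzkin) [1]

-- ===== PRECONDITION & SPEC =====
def Spec_riordan_numbers (N : Int) (out : List Int) : Prop := out = riordan_numbers_alt N
instance (N : Int) (out : List Int) : Decidable (Spec_riordan_numbers N out) := by unfold Spec_riordan_numbers; infer_instance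

-- ===== CLAIM (what is proved, stated in full; the proofs are below) =====
def Claim_equal_riordan_numbers : Prop := ∀ (N : Int), Dom_riordan_numbers N → Spec_riordan_numbers N (riordan_numbers N)

-- ===== LEMMAS AND PROOFS =====

/-- Catalan numbers as integers. -/
def catZ (k : Nat) : Int := (catalan k : Int)

/-- The alternating binomial transform of the Catalan numbers shifted by `i`. -/
def Ssum (i n : Nat) : Int :=
  ∑ k ∈ Finset.range (n + 1), (-1 : Int) ^ (n + k) * (n.choose k : Int) * catZ (k + i)

/-- B's value for R(n). -/
def S0 (n : Nat) : Int := Ssum 0 n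

/-- The Riordan sequence as computed by A (reference model). -/
def rio : Nat → Int
  | 0 => 1
  | 1 => 0
  | n + 2 =>
      PySem.Int.floordiv (((n : Int) + 1) * (2 * rio (n + 1) + 3 * rio n)) ((n : Int) + 3)

/-- Contiguous relation for Catalan numbers: `(k+2)·C(k+1) = (4k+2)·C(k)`. -/
lemma catZ_contig (k : Nat) : ((k : Int) + 2) * catZ (k + 1) = (4 * (k : Int) + 2) * catZ k := by
  have a := succ_mul_catalan_eq_centralBinom (k + 1)
  have b := Nat.succ_mul_centralBinom_succ k
  have c := succ_mul_catalan_eq_centralBinom k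
  have h2 : (k + 2) * catalan (k + 1) = (4 * k + 2) * catalan k := by
    apply Nat.eq_of_mul_eq_mul_left (Nat.succ_pos k)
    calc (k + 1) * ((k + 2) * catalan (k + 1))
        = (k + 1) * ((k + 1 + 1) * catalan (k + 1)) := by ring
      _ = (k + 1) * Nat.centralBinom (k + 1) := by rw [a]
      _ = 2 * (2 * k + 1) * Nat.centralBinom k := b
      _ = 2 * (2 * k + 1) * ((k + 1) * catalan k) := by rw [c]
      _ = (k + 1) * ((4 * k + 2) * catalan k) := by ring
  unfold catZ
  exact_mod_cast h2

lemma epow (n j : Nat) : (-1 : Int) ^ (n + 1 + (j + 1)) = (-1 : Int) ^ (n + j) := by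
  have h : n + 1 + (j + 1) = (n + j) + 2 := by omega
  rw [h, pow_add]
  norm_num

/-- Pascal's rule for the transform. -/
lemma Ssum_pascal (i n : Nat) : Ssum i (n + 1) = Ssum (i + 1) n - Ssum i n := by
  have hA : Ssum i (n + 1)
      = (∑ j ∈ Finset.range (n + 1),
          ((-1 : Int) ^ (n + j) * (n.choose j : Int) * catZ (j + (i + 1))
            + (-1 : Int) ^ (n + j) * (n.choose (j + 1) : Int) * catZ (j + (i + 1))))
        - (-1 : Int) ^ n * catZ i := by
    rw [Ssum, Finset.sum_range_succ']
    have hlast : (-1 : Int) ^ (n + 1 + 0) * ((n + 1).choose 0 : Int) * catZ (0 + i)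
        = -((-1 : Int) ^ n * catZ i) := by
      have h0 : (0 : Nat) + i = i := by omega
      rw [h0]
      simp [pow_succ]
    rw [hlast]
    have hsum : ∀ j ∈ Finset.range (n + 1),
        (-1 : Int) ^ (n + 1 + (j + 1)) * ((n + 1).choose (j + 1) : Int) * catZ (j + 1 + i)
          = (-1 : Int) ^ (n + j) * (n.choose j : Int) * catZ (j + (i + 1))
            + (-1 : Int) ^ (n + j) * (n.choose (j + 1) : Int) * catZ (j + (i + 1)) := by
      intro j _
      have e3 : j + 1 + i = j + (i + 1) := by omega
      rw [epow, e3, Nat.choose_succ_succ]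
      push_cast
      ring
    rw [Finset.sum_congr rfl hsum]
    ring
  have hB : ∑ j ∈ Finset.range (n + 1), (-1 : Int) ^ (n + j) * (n.choose (j + 1) : Int) * catZ (j + (i + 1))
      = (-1 : Int) ^ n * catZ i - Ssum i n := by
    rw [Finset.sum_range_succ]
    have hz : (n.choose (n + 1) : Int) = 0 := by
      simp [Nat.choose_succ_self]
    rw [hz]
    have hS : Ssum i n
        = (∑ j ∈ Finset.range n, -((-1 : Int) ^ (n + j) * (n.choose (j + 1) : Int) * catZ (j + (i + 1))))
          + (-1 : Int) ^ n * catZ i := by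
      rw [Ssum, Finset.sum_range_succ']
      congr 1
      · apply Finset.sum_congr rfl
        intro j _
        have e1 : n + (j + 1) = (n + j) + 1 := by omega
        have e3 : j + 1 + i = j + (i + 1) := by omega
        rw [e1, e3, pow_succ]
        ring
      · have h0 : (0 : Nat) + i = i := by omega
        rw [h0]
        simp
    rw [Finset.sum_neg_distrib] at hS
    linarith [hS]
  rw [hA, Finset.sum_add_distrib]
  have hfirst : ∑ j ∈ Finset.range (n + 1), (-1 : Int) ^ (n + j) * (n.choose j : Int) * catZ (j + (i + 1))
      = Ssum (i + 1) n := rfl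
  rw [hfirst, hB]
  ring

/-- The `k`-weighted transform reindexes to a shifted transform. -/
lemma Kweight (s n : Nat) :
    ∑ k ∈ Finset.range (n + 2), (-1 : Int) ^ (n + 1 + k) * ((k : Int) * ((n + 1).choose k : Int)) * catZ (k + s)
      = ((n : Int) + 1) * Ssum (s + 1) n := by
  rw [Finset.sum_range_succ']
  simp only [Nat.cast_zero, zero_mul, mul_zero, add_zero]
  rw [Ssum, Finset.mul_sum]
  apply Finset.sum_congr rfl
  intro j _
  have e2 : ((j : Int) + 1) * (((n + 1).choose (j + 1) : Nat) : Int) = ((n : Int) + 1) * (n.choose j : Int) := by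
    have hN : (j + 1) * ((n + 1).choose (j + 1)) = (n + 1) * (n.choose j) := by
      rw [mul_comm]
      exact (Nat.add_one_mul_choose_eq n j).symm
    exact_mod_cast hN
  have e3 : j + 1 + s = j + (s + 1) := by omega
  rw [epow, e3]
  push_cast
  push_cast at e2
  linear_combination ((-1 : Int) ^ (n + j) * catZ (j + (s + 1))) * e2

/-- The Catalan contiguous relation summed against the binomial row. -/
lemma Ssum_contig (i n : Nat) :
    ((n : Int) + 1) * Ssum (i + 2) n + ((i : Int) + 2) * Ssum (i + 1) (n + 1)
      = 4 * ((n : Int) + 1) * Ssum (i + 1) n + (4 * (i : Int) + 2) * Ssum i (n + 1) := by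
  have hT : ∑ k ∈ Finset.range (n + 2),
        (-1 : Int) ^ (n + 1 + k) * ((n + 1).choose k : Int) * (((k : Int) + (i : Int) + 2) * catZ (k + (i + 1)))
      = ∑ k ∈ Finset.range (n + 2),
        (-1 : Int) ^ (n + 1 + k) * ((n + 1).choose k : Int) * ((4 * (k : Int) + 4 * (i : Int) + 2) * catZ (k + i)) := by
    apply Finset.sum_congr rfl
    intro k _
    have hc := catZ_contig (k + i)
    have e : k + i + 1 = k + (i + 1) := by omega
    rw [e] at hc
    push_cast at hc
    linear_combination ((-1 : Int) ^ (n + 1 + k) * ((n + 1).choose k : Int)) * hc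
  have hL : ∑ k ∈ Finset.range (n + 2),
        (-1 : Int) ^ (n + 1 + k) * ((n + 1).choose k : Int) * (((k : Int) + (i : Int) + 2) * catZ (k + (i + 1)))
      = ((n : Int) + 1) * Ssum (i + 2) n + ((i : Int) + 2) * Ssum (i + 1) (n + 1) := by
    have hsplit : ∀ k ∈ Finset.range (n + 2),
        (-1 : Int) ^ (n + 1 + k) * ((n + 1).choose k : Int) * (((k : Int) + (i : Int) + 2) * catZ (k + (i + 1)))
          = (-1 : Int) ^ (n + 1 + k) * ((k : Int) * ((n + 1).choose k : Int)) * catZ (k + (i + 1))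
            + ((i : Int) + 2) * ((-1 : Int) ^ (n + 1 + k) * ((n + 1).choose k : Int) * catZ (k + (i + 1))) := by
      intro k _
      ring
    rw [Finset.sum_congr rfl hsplit, Finset.sum_add_distrib, Kweight (i + 1) n, ← Finset.mul_sum]
    rfl
  have hR : ∑ k ∈ Finset.range (n + 2),
        (-1 : Int) ^ (n + 1 + k) * ((n + 1).choose k : Int) * ((4 * (k : Int) + 4 * (i : Int) + 2) * catZ (k + i))
      = 4 * ((n : Int) + 1) * Ssum (i + 1) n + (4 * (i : Int) + 2) * Ssum i (n + 1) := by
    have hsplit : ∀ k ∈ Finset.range (n + 2),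
        (-1 : Int) ^ (n + 1 + k) * ((n + 1).choose k : Int) * ((4 * (k : Int) + 4 * (i : Int) + 2) * catZ (k + i))
          = 4 * ((-1 : Int) ^ (n + 1 + k) * ((k : Int) * ((n + 1).choose k : Int)) * catZ (k + i))
            + (4 * (i : Int) + 2) * ((-1 : Int) ^ (n + 1 + k) * ((n + 1).choose k : Int) * catZ (k + i)) := by
      intro k _
      ring
    rw [Finset.sum_congr rfl hsplit, Finset.sum_add_distrib, ← Finset.mul_sum, ← Finset.mul_sum, Kweight i n]
    have hu : Ssum i (n + 1)
        = ∑ k ∈ Finset.range (n + 2), (-1 : Int) ^ (n + 1 + k) * ((n + 1).choose k : Int) * catZ (k + i) := rfl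
    rw [← hu]
    ring
  rw [← hL, hT, hR]

/-- B's sum satisfies A's recurrence exactly. -/
lemma S0_rec (n : Nat) :
    ((n : Int) + 3) * S0 (n + 2) = ((n : Int) + 1) * (2 * S0 (n + 1) + 3 * S0 n) := by
  have hc := Ssum_contig 0 n
  have h1 := Ssum_pascal 0 n
  have h2 := Ssum_pascal 1 n
  have h3 := Ssum_pascal 0 (n + 1)
  unfold S0
  push_cast at hc ⊢
  linear_combination hc - 3 * ((n : Int) + 1) * h1 + ((n : Int) + 1) * h2 + ((n : Int) + 3) * h3

lemma S0_zero : S0 0 = 1 := by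
  simp [S0, Ssum, catZ]

lemma S0_one : S0 1 = 0 := by
  simp [S0, Ssum, Finset.sum_range_succ, catZ, pow_succ]

lemma rio_eq_S0 (n : Nat) : rio n = S0 n := by
  suffices h : ∀ m : Nat, rio m = S0 m ∧ rio (m + 1) = S0 (m + 1) from (h n).1
  intro m
  induction m with
  | zero => exact ⟨by rw [S0_zero]; rfl, by rw [S0_one]; rfl⟩
  | succ k ih =>
    refine ⟨ih.2, ?_⟩
    show PySem.Int.floordiv (((k : Int) + 1) * (2 * rio (k + 1) + 3 * rio k)) ((k : Int) + 3) = S0 (k + 2)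
    rw [ih.1, ih.2, ← S0_rec k, PySem.Int.floordiv_eq_ediv_of_pos (by positivity),
      Int.mul_ediv_cancel_left _ (by positivity)]

lemma pyGetD_map_range' (f : Nat → Int) (m k : Nat) (hk : k < m) :
    PySem.List.pyGetD ((List.range m).map f) (k : Int) 0 = f k := by
  rw [PySem.List.pyGetD_natCast]
  simp [List.getD_eq_getElem?_getD, hk]

lemma S0_two : S0 2 = 1 := by
  have h := S0_rec 0
  rw [S0_zero, S0_one] at h
  push_cast at h
  linarith

/-- The Motzkin numbers, expressed through B's transform values. -/
def MS (n : Nat) : Int := S0 n + S0 (n + 1)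

lemma MS_zero : MS 0 = 1 := by unfold MS; rw [S0_zero, S0_one]; norm_num
lemma MS_one : MS 1 = 1 := by unfold MS; rw [S0_one, S0_two]; norm_num

/-- `MS` satisfies the Motzkin holonomic recurrence exactly. -/
lemma MS_rec (n : Nat) :
    ((n : Int) + 4) * MS (n + 2) = (2 * (n : Int) + 5) * MS (n + 1) + (3 * (n : Int) + 3) * MS n := by
  have h1 := S0_rec n
  have h2 := S0_rec (n + 1)
  have e2 : n + 1 + 2 = n + 3 := by omega
  have e4 : n + 1 + 1 = n + 2 := by omega
  rw [e2] at h2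
  unfold MS
  rw [show n + 2 + 1 = n + 3 from by omega, e4]
  push_cast at h1 h2 ⊢
  linear_combination h1 + h2

/-- B's Motzkin fold builds the Motzkin numbers. -/
lemma foldlM_inv (m : Nat) (hm : 2 ≤ m) :
    (PySem.List.pyRange 2 (m : Int) 1).foldl stepM [1, 1] = (List.range m).map MS := by
  induction m with
  | zero => omega
  | succ k ih =>
    rcases Nat.lt_or_ge k 2 with hk | hk
    · interval_cases k
      · omega
      · rw [show ((1 + 1 : Nat) : Int) = 2 by norm_num, PySem.List.pyRange_one_eq_nil le_rfl]
        simp [List.range_succ, MS_zero, MS_one]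
    · obtain ⟨j, rfl⟩ : ∃ j, k = j + 2 := ⟨k - 2, by omega⟩
      have e1 : ((j + 2 + 1 : Nat) : Int) = ((j + 2 : Nat) : Int) + 1 := by push_cast; ring
      rw [e1, PySem.List.pyRange_one_succ_right (by exact_mod_cast by omega : (2 : Int) ≤ ((j + 2 : Nat) : Int)),
        List.foldl_append, ih (by omega)]
      simp only [List.foldl_cons, List.foldl_nil, stepM]
      have g1 : PySem.List.pyGetD ((List.range (j + 2)).map MS) (((j + 2 : Nat) : Int) - 1) 0 = MS (j + 1) := by
        rw [show ((j + 2 : Nat) : Int) - 1 = ((j + 1 : Nat) : Int) by push_cast; ring]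
        exact pyGetD_map_range' MS (j + 2) (j + 1) (by omega)
      have g2 : PySem.List.pyGetD ((List.range (j + 2)).map MS) (((j + 2 : Nat) : Int) - 2) 0 = MS j := by
        rw [show ((j + 2 : Nat) : Int) - 2 = ((j : Nat) : Int) by push_cast; ring]
        exact pyGetD_map_range' MS (j + 2) j (by omega)
      rw [g1, g2]
      have hv : PySem.Int.floordiv
          ((2 * ((j + 2 : Nat) : Int) + 1) * MS (j + 1) + (3 * ((j + 2 : Nat) : Int) - 3) * MS j)
          (((j + 2 : Nat) : Int) + 2) = MS (j + 2) := by
        have hr := MS_rec j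
        have e : (2 * ((j + 2 : Nat) : Int) + 1) * MS (j + 1) + (3 * ((j + 2 : Nat) : Int) - 3) * MS j
            = (((j + 2 : Nat) : Int) + 2) * MS (j + 2) := by
          push_cast
          linear_combination -hr
        rw [e, PySem.Int.floordiv_eq_ediv_of_pos (by positivity),
          Int.mul_ediv_cancel_left _ (by positivity)]
      rw [hv]
      simp [List.range_succ]

/-- B's output fold peels the Riordan numbers off the Motzkin numbers. -/
lemma foldlR_inv (L m : Nat) (h1 : 1 ≤ m) (hL : m ≤ L + 1) :
    (PySem.List.pyRange 1 (m : Int) 1).foldl (stepR ((List.range L).map MS)) [1]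
      = (List.range m).map S0 := by
  induction m with
  | zero => omega
  | succ k ih =>
    rcases Nat.lt_or_ge k 1 with hk | hk
    · interval_cases k
      rw [show ((0 + 1 : Nat) : Int) = 1 by norm_num, PySem.List.pyRange_one_eq_nil le_rfl]
      simp [S0_zero]
    · have e1 : ((k + 1 : Nat) : Int) = ((k : Nat) : Int) + 1 := by push_cast; ring
      rw [e1, PySem.List.pyRange_one_succ_right (by exact_mod_cast hk : (1 : Int) ≤ ((k : Nat) : Int)),
        List.foldl_append, ih (by omega) (by omega)]
      simp only [List.foldl_cons, List.foldl_nil, stepR]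
      have g1 : PySem.List.pyGetD ((List.range L).map MS) (((k : Nat) : Int) - 1) 0 = MS (k - 1) := by
        rw [show ((k : Nat) : Int) - 1 = ((k - 1 : Nat) : Int) by omega]
        exact pyGetD_map_range' MS L (k - 1) (by omega)
      have g2 : PySem.List.pyGetD ((List.range k).map S0) (-1) 0 = S0 (k - 1) := by
        have hne : (List.range k).map S0 ≠ [] := by
          simp
          omega
        rw [PySem.List.pyGetD_neg_one _ _ hne, List.getLast_eq_getElem]
        simp
      rw [g1, g2]
      have hval : MS (k - 1) - S0 (k - 1) = S0 k := by
        unfold MS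
        rw [show k - 1 + 1 = k from by omega]
        ring
      rw [hval]
      simp [List.range_succ]

/-- Value of B's port for `N ≥ 3`. -/
lemma alt_eq_map (m : Nat) (hm : 3 ≤ m) :
    riordan_numbers_alt (m : Int) = (List.range m).map S0 := by
  rw [riordan_numbers_alt, if_neg (by exact_mod_cast by omega : ¬ ((m : Int) ≤ 0))]
  show (PySem.List.pyRange 1 (m : Int) 1).foldl
      (stepR ((PySem.List.pyRange 2 ((m : Int) - 1) 1).foldl stepM [1, 1])) [1]
    = (List.range m).map S0
  rw [show (m : Int) - 1 = ((m - 1 : Nat) : Int) by omega,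
    foldlM_inv (m - 1) (by omega), foldlR_inv (m - 1) m (by omega) (by omega)]

lemma pyGetD_prefix (m : Nat) (tail : List Int) (i : Nat) (hi : i < m) :
    PySem.List.pyGetD ((List.range m).map rio ++ tail) (i : Int) 0 = rio i := by
  rw [PySem.List.pyGetD_natCast]
  rw [List.getD_eq_getElem?_getD, List.getElem?_append_left (by simpa using hi)]
  simp [hi]

lemma foldlA_inv (len m : Nat) (h2 : 2 ≤ m) (hm : m ≤ len) :
    (PySem.List.pyRange 2 (m : Int) 1).foldl stepA
      (((List.replicate len (0 : Int)).set 0 1).set 1 0)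
      = (List.range m).map rio ++ List.replicate (len - m) (0 : Int) := by
  induction m with
  | zero => omega
  | succ k ih =>
    rcases Nat.lt_or_ge k 2 with hk | hk
    · interval_cases k
      · omega
      · rw [show ((1 + 1 : Nat) : Int) = 2 by norm_num,
          PySem.List.pyRange_one_eq_nil (by norm_num)]
        obtain ⟨len', rfl⟩ : ∃ len', len = len' + 2 := ⟨len - 2, by omega⟩
        simp [List.replicate_succ, rio, List.range_succ]
    · obtain ⟨j, rfl⟩ : ∃ j, k = j + 2 := ⟨k - 2, by omega⟩
      have e1 : ((j + 2 + 1 : Nat) : Int) = ((j : Int) + 2) + 1 := by push_cast; ring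
      have e0 : ((j + 2 : Nat) : Int) = (j : Int) + 2 := by push_cast; ring
      rw [e1, PySem.List.pyRange_one_succ_right (by omega), ← e0, List.foldl_append,
        ih (by omega) (by omega)]
      have hrep : len - (j + 2) = (len - (j + 3)) + 1 := by omega
      rw [hrep, List.replicate_succ]
      simp only [List.foldl_cons, List.foldl_nil, stepA, e0]
      have g1 : PySem.List.pyGetD ((List.range (j + 2)).map rio ++ (0 :: List.replicate (len - (j + 3)) 0)) (((j : Int) + 2) - 1) 0 = rio (j + 1) := by
        have := pyGetD_prefix (j + 2) (0 :: List.replicate (len - (j + 3)) 0) (j + 1) (by omega)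
        rw [show ((j : Int) + 2) - 1 = ((j + 1 : Nat) : Int) by push_cast; ring]
        exact this
      have g2 : PySem.List.pyGetD ((List.range (j + 2)).map rio ++ (0 :: List.replicate (len - (j + 3)) 0)) (((j : Int) + 2) - 2) 0 = rio j := by
        have := pyGetD_prefix (j + 2) (0 :: List.replicate (len - (j + 3)) 0) j (by omega)
        rw [show ((j : Int) + 2) - 2 = ((j : Nat) : Int) by norm_num]
        exact this
      rw [g1, g2]
      have hv : PySem.Int.floordiv (((j : Int) + 2 - 1) * (2 * rio (j + 1) + 3 * rio j)) (((j : Int) + 2) + 1) = rio (j + 2) := by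
        simp only [rio]
        congr 1
        ring_nf
      rw [hv]
      have hset : ((j : Int) + 2).toNat = j + 2 := by omega
      rw [hset, List.set_append_right _ _ (by simp)]
      simp only [List.length_map, List.length_range, Nat.sub_self, List.set_cons_zero]
      simp [List.range_succ]

-- ===== VERDICT (by name: the statement is the Claim_ definition above) =====
theorem riordan_numbers_spec : Claim_equal_riordan_numbers := by
  intro N _
  show riordan_numbers N = riordan_numbers_alt N
  by_cases h0 : N ≤ 0
  · simp [riordan_numbers, riordan_numbers_alt, h0]
  · by_cases h1 : N = 1
    · subst h1
      decide
    · by_cases hq : N = 2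
      · subst hq
        decide
      · have hN2 : 3 ≤ N := by omega
        obtain ⟨m, hm⟩ : ∃ m : Nat, N = (m : Int) := ⟨N.toNat, by omega⟩
        subst hm
        have hm2 : 3 ≤ m := by exact_mod_cast hN2
        rw [alt_eq_map m (by omega)]
        rw [riordan_numbers, if_neg h0]
        simp only [Int.toNat_natCast, gt_iff_lt]
        rw [if_pos (by exact_mod_cast (by omega : (1 : Int) < (m : Int)))]
        show (PySem.List.pyRange 2 (m : Int) 1).foldl stepA
            (((List.replicate m (0 : Int)).set 0 1).set 1 0) = (List.range m).map S0
        rw [foldlA_inv m m (by omega) le_rfl]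
        simp [List.map_congr_left (fun n _ => rio_eq_S0 n)]
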